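-- pv_equiv track=rewrite | github.com/xdaniel52/DailyCodingProblems-AuthorialSolutions | 201-300/DailyCodingProblem283.py | find_regular_numbers
-- ===== SOURCE A (Python) =====
-- def find_regular_numbers(n):
--     div=[2,3,5]
--     result = {1}
--     bound = 100
--     while len(result) < 2*n:
--         tmp = set()
--         for res in result:
--             for num in div:
--                 new_num = res*num
--                 while new_num < bound:
--                     tmp.add(new_num)
--                     new_num = new_num*num
--         result=result.union(tmp)
--         bound+=100
--
--     return sorted(list(result),key=lambda x: x)[:n]
-- ===== SOURCE B (Python) =====
-- def find_regular_numbers(n):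
--     # Enumerate every 5-smooth number 2**a * 3**b * 5**c below a limit that
--     # doubles until at least n candidates exist, then sort and take the first n.
--     if n <= 0:
--         return []
--     limit = 2
--     while True:
--         vals = []
--         a = 1
--         while a < limit:
--             b = a
--             while b < limit:
--                 c = b
--                 while c < limit:
--                     vals.append(c)
--                     c *= 5
--                 b *= 3
--             a *= 2
--         if len(vals) >= n:
--             return sorted(vals)[:n]
--         limit *= 2
-- ===== Notes on version B (the rewrite author's own statement) =====
-- stated objective: faster
-- what changed: A saturates a set by repeated full rescans while growing the cutoff by only 100 per pass until it holds 2n elements; B directly enumerates every product 2^a*3^b*5^c below a limit that doubles until n candidates exist, then sorts once and takes the first n.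
-- intended difference: For n in {6, 18, 19} A's loop reaches 2n elements before products of several distinct primes (6, 30, ...) have been generated, so A returns a prefix with those Hamming numbers missing (e.g. A(6) = [1,2,3,4,5,8]); B returns the true first n Hamming numbers ([1,2,3,4,5,6]), which is the intended value. — e.g. on find_regular_numbers(6): A returns [1, 2, 3, 4, 5, 8], B returns [1, 2, 3, 4, 5, 6]
import Mathlib
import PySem

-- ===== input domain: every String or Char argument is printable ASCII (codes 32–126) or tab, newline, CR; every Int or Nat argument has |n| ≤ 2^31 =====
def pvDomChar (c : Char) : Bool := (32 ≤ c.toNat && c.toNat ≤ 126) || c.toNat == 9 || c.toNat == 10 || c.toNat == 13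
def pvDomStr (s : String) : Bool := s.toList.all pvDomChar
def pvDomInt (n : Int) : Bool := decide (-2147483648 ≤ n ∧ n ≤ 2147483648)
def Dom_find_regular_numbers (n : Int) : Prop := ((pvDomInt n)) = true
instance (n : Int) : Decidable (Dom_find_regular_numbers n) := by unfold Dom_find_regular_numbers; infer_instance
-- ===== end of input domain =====

set_option maxRecDepth 100000


-- B replaces A's pass-after-pass set saturation (cutoff growing by 100 per pass) by direct
-- enumeration of all products 2^a*3^b*5^c below a doubling limit, then one sort (faster).

-- ===== PORT A =====
-- kernel-reducible integer square root (used only to compute fuel bounds)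
def pvSqrtGo : Nat → Nat → Nat
  | 0, _ => 0
  | f+1, t =>
      if t < 2 then t else
        let r := 2 * pvSqrtGo f (t / 4)
        if (r+1) * (r+1) ≤ t then r+1 else r

def pvSqrt (t : Nat) : Nat := pvSqrtGo t t

-- inner 'while new_num < bound': fuel (bound.toNat+1) only makes the recursion total; it is
-- never exhausted since new_num grows by at least 1 per step from a positive start.
def pvInnerA (p bound : Int) : Nat → Int → PySem.Set Int → PySem.Set Int
  | 0, _, tmp => tmp
  | f+1, w, tmp => if w < bound then pvInnerA p bound f (w*p) (PySem.Set.add tmp w) else tmp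

-- one iteration of A's outer 'while' body: build tmp, then result.union(tmp)
def pvPassA (result : PySem.Set Int) (bound : Int) : PySem.Set Int :=
  let tmp := result.foldl
    (fun tmp res => ([2, 3, 5] : List Int).foldl
      (fun tmp num => pvInnerA num bound (bound.toNat + 1) (res * num) tmp) tmp)
    PySem.Set.empty
  PySem.Set.union result tmp

-- 'while len(result) < 2*n': fuel is a totality guard; pvFuelA n passes are proved sufficient.
def pvLoopA (n : Int) : Nat → PySem.Set Int → Int → PySem.Set Int
  | 0, result, _ => result
  | f+1, result, bound =>
      if PySem.Set.len result < 2 * n then pvLoopA n f (pvPassA result bound) (bound + 100)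
      else result

def pvFuelA (n : Int) : Nat := 6 ^ (pvSqrt (2 * n).toNat + 1) + 3

def find_regular_numbers (n : Int) : List Int :=
  PySem.List.slice
    (PySem.List.sorted (pvLoopA n (pvFuelA n) (PySem.Set.ofList [1]) 100) (fun x => x) false)
    none (some n)

-- ===== PORT B =====
-- 'while c < limit: vals.append(c); c *= 5' (and the analogous *3, *2 loops); the fuel
-- (limit.toNat+1) is a totality guard only.
def pvLoop5 (limit : Int) : Nat → Int → List Int → List Int
  | 0, _, vals => vals
  | f+1, c, vals => if c < limit then pvLoop5 limit f (c*5) (vals ++ [c]) else vals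

def pvLoop3 (limit : Int) : Nat → Int → List Int → List Int
  | 0, _, vals => vals
  | f+1, b, vals => if b < limit then pvLoop3 limit f (b*3) (pvLoop5 limit (limit.toNat+1) b vals) else vals

def pvLoop2 (limit : Int) : Nat → Int → List Int → List Int
  | 0, _, vals => vals
  | f+1, a, vals => if a < limit then pvLoop2 limit f (a*2) (pvLoop3 limit (limit.toNat+1) a vals) else vals

-- 'while True' with a return inside; pvFuelB n doublings are proved sufficient.
def pvLoopB (n : Int) : Nat → Int → List Int
  | 0, _ => []
  | f+1, limit =>
      let vals := pvLoop2 limit (limit.toNat + 1) 1 []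
      if n ≤ (vals.length : Int) then
        PySem.List.slice (PySem.List.sorted vals (fun x => x) false) none (some n)
      else pvLoopB n f (limit * 2)

def pvFuelB (n : Int) : Nat := 3 * (pvSqrt n.toNat + 1) + 1

def find_regular_numbers_alt (n : Int) : List Int :=
  if n ≤ 0 then [] else pvLoopB n (pvFuelB n) 2

-- ===== PRECONDITION & SPEC =====
-- For n in {6, 18, 19} A's loop reaches 2n elements before products of several distinct primes
-- (6, 30, ...) have been generated, so A returns a prefix missing them (A 6 = [1,2,3,4,5,8]);
-- B returns the true first n Hamming numbers ([1,2,3,4,5,6]), the intended value.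
def D_find_regular_numbers (n : Int) : Prop := n = 6 ∨ n = 18 ∨ n = 19
instance (n : Int) : Decidable (D_find_regular_numbers n) := by unfold D_find_regular_numbers; infer_instance

def Spec_find_regular_numbers (n : Int) (out : List Int) : Prop :=
  ¬ D_find_regular_numbers n → out = find_regular_numbers_alt n
instance (n : Int) (out : List Int) : Decidable (Spec_find_regular_numbers n out) := by
  unfold Spec_find_regular_numbers; infer_instance

def pvDiffWitness_find_regular_numbers : Int := 6
def pvDiffWitnessOut_find_regular_numbers : (List Int) × (List Int) :=
  ([1, 2, 3, 4, 5, 8], [1, 2, 3, 4, 5, 6])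

-- ===== CLAIM (what is proved, stated in full; the proofs are below) =====
def Claim_unchanged_find_regular_numbers : Prop :=
  ∀ (n : Int), Dom_find_regular_numbers n → Spec_find_regular_numbers n (find_regular_numbers n)
def Claim_changed_find_regular_numbers : Prop :=
  Dom_find_regular_numbers (pvDiffWitness_find_regular_numbers) ∧
  D_find_regular_numbers (pvDiffWitness_find_regular_numbers) ∧
  find_regular_numbers (pvDiffWitness_find_regular_numbers) = pvDiffWitnessOut_find_regular_numbers.1 ∧
  find_regular_numbers_alt (pvDiffWitness_find_regular_numbers) = pvDiffWitnessOut_find_regular_numbers.2 ∧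
  pvDiffWitnessOut_find_regular_numbers.1 ≠ pvDiffWitnessOut_find_regular_numbers.2
def Claim_exact_find_regular_numbers : Prop :=
  ∀ (n : Int), Dom_find_regular_numbers n → D_find_regular_numbers n →
    find_regular_numbers n ≠ find_regular_numbers_alt n

-- ===== LEMMAS AND PROOFS =====

-- 5-smooth ("Hamming/regular") numbers
def isHam (x : Int) : Prop := ∃ a b c : ℕ, x = 2^a * 3^b * 5^c

theorem ham_pos {x : Int} (h : isHam x) : 1 ≤ x := by
  obtain ⟨a, b, c, rfl⟩ := h
  have h2 : (1:ℤ) ≤ 2^a := one_le_pow₀ (by norm_num)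
  have h3 : (1:ℤ) ≤ 3^b := one_le_pow₀ (by norm_num)
  have h5 : (1:ℤ) ≤ 5^c := one_le_pow₀ (by norm_num)
  have h23 : (1:ℤ) ≤ 2^a * 3^b := by nlinarith
  nlinarith

theorem one_le_pp (p q : Int) (j k : ℕ) (hp : 1 ≤ p) (hq : 1 ≤ q) :
    (1:ℤ) ≤ p ^ j * q ^ k := by
  have h1 : (1:ℤ) ≤ p ^ j := one_le_pow₀ hp
  have h2 : (1:ℤ) ≤ q ^ k := one_le_pow₀ hq
  nlinarith

theorem flatMap_congr' {α β : Type} (l : List α) (f g : α → List β)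
    (h : ∀ x ∈ l, f x = g x) : l.flatMap f = l.flatMap g := by
  induction l with
  | nil => simp
  | cons a t ih =>
      simp only [List.flatMap_cons]
      rw [h a List.mem_cons_self, ih (fun x hx => h x (List.mem_cons_of_mem _ hx))]

theorem ham_mul_pow (r p : Int) (k : ℕ) (hp : p = 2 ∨ p = 3 ∨ p = 5) (h : isHam r) :
    isHam (r * p^k) := by
  obtain ⟨a, b, c, rfl⟩ := h
  rcases hp with rfl | rfl | rfl
  · exact ⟨a + k, b, c, by rw [pow_add]; ring⟩
  · exact ⟨a, b + k, c, by rw [pow_add]; ring⟩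
  · exact ⟨a, b, c + k, by rw [pow_add]; ring⟩

theorem ham_split (x : Int) (h : isHam x) (h2 : 2 ≤ x) :
    ∃ y p, isHam y ∧ (p = (2:ℤ) ∨ p = 3 ∨ p = 5) ∧ x = y * p ∧ 2 * y ≤ x := by
  obtain ⟨a, b, c, rfl⟩ := h
  match a, b, c with
  | a+1, b, c =>
      have hy : isHam (2^a * 3^b * 5^c) := ⟨a, b, c, rfl⟩
      have hx : (2:ℤ)^(a+1) * 3^b * 5^c = (2^a * 3^b * 5^c) * 2 := by rw [pow_succ]; ring
      refine ⟨2^a * 3^b * 5^c, 2, hy, Or.inl rfl, hx, ?_⟩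
      have hy0 := ham_pos hy
      rw [hx]
      nlinarith
  | 0, b+1, c =>
      have hy : isHam (2^0 * 3^b * 5^c) := ⟨0, b, c, rfl⟩
      have hx : (2:ℤ)^0 * 3^(b+1) * 5^c = (2^0 * 3^b * 5^c) * 3 := by rw [pow_succ]; ring
      refine ⟨2^0 * 3^b * 5^c, 3, hy, Or.inr (Or.inl rfl), hx, ?_⟩
      have hy0 := ham_pos hy
      rw [hx]
      nlinarith
  | 0, 0, c+1 =>
      have hy : isHam (2^0 * 3^0 * 5^c) := ⟨0, 0, c, rfl⟩
      have hx : (2:ℤ)^0 * 3^0 * 5^(c+1) = (2^0 * 3^0 * 5^c) * 5 := by rw [pow_succ]; ring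
      refine ⟨2^0 * 3^0 * 5^c, 5, hy, Or.inr (Or.inr rfl), hx, ?_⟩
      have hy0 := ham_pos hy
      rw [hx]
      nlinarith
  | 0, 0, 0 => norm_num at h2

-- ---- A side: the inner geometric while loop ----
theorem pvInnerA_mem (p bound : Int) (hp : 2 ≤ p) :
    ∀ (f : ℕ) (w : Int) (tmp : PySem.Set Int), 1 ≤ w → bound ≤ w + (f:ℤ) →
      ∀ x, (x ∈ pvInnerA p bound f w tmp ↔ x ∈ tmp ∨ ∃ j : ℕ, x = w * p^j ∧ x < bound) := by
  intro f
  induction f with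
  | zero =>
      intro w tmp hw hb x
      simp only [pvInnerA]
      constructor
      · exact Or.inl
      · rintro (h | ⟨j, rfl, hlt⟩)
        · exact h
        · exfalso
          have hpj : (1:ℤ) ≤ p^j := one_le_pow₀ (by omega)
          have : w ≤ w * p^j := le_mul_of_one_le_right (by omega) hpj
          simp only [Nat.cast_zero] at hb
          omega
  | succ f ih =>
      intro w tmp hw hb x
      simp only [pvInnerA]
      by_cases hcond : w < bound
      · rw [if_pos hcond]
        have hwp : w + 1 ≤ w * p := by nlinarith
        rw [ih (w * p) _ (by nlinarith) (by push_cast at hb ⊢; omega)]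
        rw [PySem.Set.mem_add]
        constructor
        · rintro ((h | rfl) | ⟨j, rfl, hlt⟩)
          · exact Or.inl h
          · exact Or.inr ⟨0, by simp, hcond⟩
          · exact Or.inr ⟨j + 1, by rw [pow_succ]; ring, hlt⟩
        · rintro (h | ⟨j, hj, hlt⟩)
          · exact Or.inl (Or.inl h)
          · cases j with
            | zero => exact Or.inl (Or.inr (by simpa using hj))
            | succ j => exact Or.inr ⟨j, by rw [hj, pow_succ]; ring, hlt⟩
      · rw [if_neg hcond]
        constructor
        · exact Or.inl
        · rintro (h | ⟨j, rfl, hlt⟩)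
          · exact h
          · exfalso
            have hpj : (1:ℤ) ≤ p^j := one_le_pow₀ (by omega)
            have : w ≤ w * p^j := le_mul_of_one_le_right (by omega) hpj
            omega

-- the 'for num in div' loop, abstracted as one step of the 'for res in result' fold
def pvStep (bound : Int) (tmp : PySem.Set Int) (res : Int) : PySem.Set Int :=
  ([2, 3, 5] : List Int).foldl
    (fun tmp num => pvInnerA num bound (bound.toNat + 1) (res * num) tmp) tmp

theorem pvStep_mem (bound res : Int) (hres : 1 ≤ res) (tmp : PySem.Set Int) (x : Int) :
    x ∈ pvStep bound tmp res ↔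
      x ∈ tmp ∨ ∃ p, (p = (2:ℤ) ∨ p = 3 ∨ p = 5) ∧ ∃ j : ℕ, x = res * p * p^j ∧ x < bound := by
  have hfuel : ∀ q : ℤ, 2 ≤ q → bound ≤ res * q + ((bound.toNat + 1 : ℕ) : ℤ) := by
    intro q hq
    have h1 : (2:ℤ) ≤ res * q := by nlinarith
    have h2 := Int.self_le_toNat bound
    push_cast
    omega
  unfold pvStep
  simp only [List.foldl_cons, List.foldl_nil]
  rw [pvInnerA_mem 5 bound (by norm_num) _ _ _ (by nlinarith) (hfuel 5 (by norm_num))]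
  rw [pvInnerA_mem 3 bound (by norm_num) _ _ _ (by nlinarith) (hfuel 3 (by norm_num))]
  rw [pvInnerA_mem 2 bound (by norm_num) _ _ _ (by nlinarith) (hfuel 2 (by norm_num))]
  constructor
  · rintro (((h | h2) | h3) | h5)
    · exact Or.inl h
    · exact Or.inr ⟨2, Or.inl rfl, h2⟩
    · exact Or.inr ⟨3, Or.inr (Or.inl rfl), h3⟩
    · exact Or.inr ⟨5, Or.inr (Or.inr rfl), h5⟩
  · rintro (h | ⟨p, (rfl | rfl | rfl), hj⟩)
    · exact Or.inl (Or.inl (Or.inl h))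
    · exact Or.inl (Or.inl (Or.inr hj))
    · exact Or.inl (Or.inr hj)
    · exact Or.inr hj

-- the 'for res in result' loop
theorem passFold_mem (bound : Int) :
    ∀ (S : List Int) (tmp : PySem.Set Int), (∀ r ∈ S, 1 ≤ r) →
      ∀ x, (x ∈ S.foldl (pvStep bound) tmp ↔
        x ∈ tmp ∨ ∃ r ∈ S, ∃ p, (p = (2:ℤ) ∨ p = 3 ∨ p = 5) ∧ ∃ j : ℕ, x = r * p * p^j ∧ x < bound) := by
  intro S
  induction S with
  | nil => intro tmp _ x; simp
  | cons r S ih =>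
      intro tmp hpos x
      rw [List.foldl_cons]
      rw [ih _ (fun r hr => hpos r (List.mem_cons_of_mem _ hr)) x,
        pvStep_mem bound r (hpos r List.mem_cons_self) tmp x]
      constructor
      · rintro ((h | hr) | ⟨r', hr', hrest⟩)
        · exact Or.inl h
        · exact Or.inr ⟨r, List.mem_cons_self, hr⟩
        · exact Or.inr ⟨r', List.mem_cons_of_mem _ hr', hrest⟩
      · rintro (h | ⟨r', hr', hrest⟩)
        · exact Or.inl (Or.inl h)
        · rcases List.mem_cons.mp hr' with rfl | hmem
          · exact Or.inl (Or.inr hrest)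
          · exact Or.inr ⟨r', hmem, hrest⟩

theorem pvPassA_eq (S : PySem.Set Int) (bound : Int) :
    pvPassA S bound = PySem.Set.union S (S.foldl (pvStep bound) PySem.Set.empty) := rfl

theorem pvPassA_mem (S : PySem.Set Int) (bound : Int) (hpos : ∀ r ∈ S, 1 ≤ r) (x : Int) :
    x ∈ pvPassA S bound ↔
      x ∈ S ∨ ∃ r ∈ S, ∃ p, (p = (2:ℤ) ∨ p = 3 ∨ p = 5) ∧ ∃ j : ℕ, x = r * p * p^j ∧ x < bound := by
  rw [pvPassA_eq, PySem.Set.mem_union, passFold_mem bound S PySem.Set.empty hpos x]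
  have hemp : x ∈ (PySem.Set.empty : PySem.Set Int) ↔ False := by
    simp [PySem.Set.empty]
  rw [hemp, false_or]

theorem pvPassA_nodup (S : PySem.Set Int) (bound : Int) (h : S.Nodup) :
    (pvPassA S bound).Nodup := by
  rw [pvPassA_eq]
  exact PySem.Set.nodup_union _ _ h

-- one saturated pass: from exactly the Hamming numbers below B₀ ≥ 200 to exactly those below B₀+100
theorem pass_ham (S : PySem.Set Int) (bound B₀ : Int)
    (hmem : ∀ x, x ∈ S ↔ isHam x ∧ x < B₀) (h200 : 200 ≤ B₀) (hb : bound = B₀ + 100) :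
    ∀ x, x ∈ pvPassA S bound ↔ isHam x ∧ x < bound := by
  have hpos : ∀ r ∈ S, 1 ≤ r := fun r hr => ham_pos ((hmem r).mp hr).1
  intro x
  rw [pvPassA_mem S bound hpos x]
  constructor
  · rintro (hx | ⟨r, hr, p, hp, j, rfl, hlt⟩)
    · obtain ⟨hham, hlt⟩ := (hmem x).mp hx
      exact ⟨hham, by omega⟩
    · obtain ⟨hham, _⟩ := (hmem r).mp hr
      refine ⟨?_, hlt⟩
      have : r * p * p^j = r * p^(j+1) := by rw [pow_succ]; ring
      rw [this]
      exact ham_mul_pow r p (j+1) hp hham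
  · rintro ⟨hham, hlt⟩
    by_cases hx : x < B₀
    · exact Or.inl ((hmem x).mpr ⟨hham, hx⟩)
    · have h2x : 2 ≤ x := by omega
      obtain ⟨y, p, hy, hp, rfl, hsz⟩ := ham_split x hham h2x
      have hyB : y < B₀ := by omega
      exact Or.inr ⟨y, (hmem y).mpr ⟨hy, hyB⟩, p, hp, 0, by ring, hlt⟩

-- ---- unique factorization over {2,3,5} ----
theorem pow_mul_inj_nat (p : ℕ) (hp : 2 ≤ p) :
    ∀ (a a' m m' : ℕ), ¬ p ∣ m → ¬ p ∣ m' → p^a * m = p^a' * m' → a = a' ∧ m = m' := by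
  intro a
  induction a with
  | zero =>
      intro a' m m' hm hm' h
      cases a' with
      | zero => simpa using h
      | succ k =>
          exfalso
          exact hm ⟨p^k * m', by rw [show m = p^(k+1) * m' by simpa using h, pow_succ]; ring⟩
  | succ a ih =>
      intro a' m m' hm hm' h
      cases a' with
      | zero =>
          exfalso
          have h' : m' = p^(a+1) * m := by simpa using h.symm
          exact hm' ⟨p^a * m, by rw [h', pow_succ]; ring⟩
      | succ k =>
          have h' : p * (p^a * m) = p * (p^k * m') := by
            calc p * (p^a * m) = p^(a+1) * m := by rw [pow_succ]; ring
            _ = p^(k+1) * m' := h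
            _ = p * (p^k * m') := by rw [pow_succ]; ring
          obtain ⟨h1, h2⟩ := ih k m m' hm hm' (Nat.eq_of_mul_eq_mul_left (by omega) h')
          exact ⟨by omega, h2⟩

theorem triple_inj (a b c a' b' c' : ℕ)
    (h : 2^a * 3^b * 5^c = 2^a' * 3^b' * 5^c') : a = a' ∧ b = b' ∧ c = c' := by
  have not2 : ∀ (u v : ℕ), ¬ (2 ∣ 3^u * 5^v) := by
    intro u v hd
    rcases (Nat.Prime.dvd_mul Nat.prime_two).mp hd with h' | h' <;>
      (first
        | exact absurd (Nat.Prime.dvd_of_dvd_pow Nat.prime_two h') (by norm_num))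
  have not3 : ∀ (v : ℕ), ¬ (3 ∣ 5^v) := by
    intro v hd
    exact absurd (Nat.Prime.dvd_of_dvd_pow Nat.prime_three hd) (by norm_num)
  have h1 : 2^a * (3^b * 5^c) = 2^a' * (3^b' * 5^c') := by
    rw [← mul_assoc, ← mul_assoc]; exact h
  obtain ⟨ha, hrest⟩ := pow_mul_inj_nat 2 (by norm_num) a a' _ _ (not2 b c) (not2 b' c') h1
  obtain ⟨hb, hrest2⟩ := pow_mul_inj_nat 3 (by norm_num) b b' _ _ (not3 c) (not3 c') hrest
  exact ⟨ha, hb, Nat.pow_right_injective (by norm_num) hrest2⟩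

theorem triple_inj_int (a b c a' b' c' : ℕ)
    (h : (2:ℤ)^a * 3^b * 5^c = 2^a' * 3^b' * 5^c') : a = a' ∧ b = b' ∧ c = c' := by
  have hnat : ((2^a * 3^b * 5^c : ℕ) : ℤ) = ((2^a' * 3^b' * 5^c' : ℕ) : ℤ) := by
    push_cast
    exact h
  exact triple_inj a b c a' b' c' (Nat.cast_inj.mp hnat)

-- ---- counting: a Hamming set below B ≥ 6^m has at least m*m elements ----
theorem ham_length_ge (S : List Int) (B : Int) (m : ℕ) (hnd : S.Nodup)
    (hmem : ∀ x, x ∈ S ↔ isHam x ∧ x < B) (h6 : (6:ℤ)^m ≤ B) : m * m ≤ S.length := by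
  classical
  set W : List Int := ((List.range m) ×ˢ (List.range m)).map (fun ab => (2:ℤ)^ab.1 * 3^ab.2)
    with hW
  have hlen : W.length = m * m := by
    simp [hW, List.length_product]
  have hndW : W.Nodup := by
    refine List.Nodup.map_on ?_ (List.Nodup.product List.nodup_range List.nodup_range)
    rintro ⟨a, b⟩ _ ⟨a', b'⟩ _ hfe
    have h5 : (2:ℤ)^a * 3^b * 5^0 = 2^a' * 3^b' * 5^0 := by
      simpa using hfe
    obtain ⟨h1, h2, _⟩ := triple_inj_int a b 0 a' b' 0 h5
    simp [h1, h2]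
  have hsub : ∀ x ∈ W, x ∈ S := by
    intro x hx
    simp only [hW, List.mem_map, List.mem_product, List.mem_range, Prod.exists] at hx
    obtain ⟨a, b, ⟨ha, hb⟩, rfl⟩ := hx
    rw [hmem]
    refine ⟨⟨a, b, 0, by ring⟩, ?_⟩
    have hlt : (2:ℤ)^a * 3^b < 2^m * 3^m := by
      have h2' : (2:ℤ)^a < 2^m := pow_lt_pow_right₀ (by norm_num) ha
      have h3' : (3:ℤ)^b < 3^m := pow_lt_pow_right₀ (by norm_num) hb
      exact mul_lt_mul'' h2' h3' (by positivity) (by positivity)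
    have h63 : (2:ℤ)^m * 3^m = 6^m := by rw [← mul_pow]; norm_num
    omega
  calc m * m = W.length := hlen.symm
    _ = W.toFinset.card := (List.toFinset_card_of_nodup hndW).symm
    _ ≤ S.toFinset.card := Finset.card_le_card (by
        intro x hx
        rw [List.mem_toFinset] at hx ⊢
        exact hsub x hx)
    _ ≤ S.length := by
        rw [List.toFinset_card_of_nodup hnd]

-- ---- concrete first three passes of A ----
def pvL1 : List Int := [1, 2, 4, 8, 16, 32, 64, 3, 9, 27, 81, 5, 25]
def pvL2 : List Int := [1, 2, 4, 8, 16, 32, 64, 3, 9, 27, 81, 5, 25, 128, 125, 6, 18, 54, 162,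
  10, 50, 12, 36, 108, 20, 100, 24, 72, 40, 48, 144, 80, 96, 160, 192, 15, 75, 45, 135]
def pvL3 : List Int := [1, 2, 4, 8, 16, 32, 64, 3, 9, 27, 81, 5, 25, 128, 125, 6, 18, 54, 162,
  10, 50, 12, 36, 108, 20, 100, 24, 72, 40, 48, 144, 80, 96, 160, 192, 15, 75, 45, 135, 256,
  243, 250, 216, 200, 288, 225, 30, 150, 90, 270, 60, 180, 120, 240]

-- reflection checker: strip all factors p
def pvStrip (p : ℕ) : ℕ → ℕ → ℕ
  | 0, n => n
  | f+1, n => if n % p = 0 ∧ n ≠ 0 then pvStrip p f (n / p) else n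

theorem pvStrip_factor (p : ℕ) : ∀ (f n : ℕ), ∃ k : ℕ, n = p^k * pvStrip p f n := by
  intro f
  induction f with
  | zero => intro n; exact ⟨0, by simp [pvStrip]⟩
  | succ f ih =>
      intro n
      simp only [pvStrip]
      split_ifs with h
      · obtain ⟨k, hk⟩ := ih (n / p)
        refine ⟨k + 1, ?_⟩
        rw [pow_succ]
        calc n = n / p * p := (Nat.div_mul_cancel (Nat.dvd_of_mod_eq_zero h.1)).symm
          _ = p^k * pvStrip p f (n / p) * p := by rw [← hk]
          _ = p^k * p * pvStrip p f (n / p) := by ring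
      · exact ⟨0, by simp⟩

def pvHamChk (v : Int) : Bool :=
  pvStrip 5 v.toNat (pvStrip 3 v.toNat (pvStrip 2 v.toNat v.toNat)) == 1

theorem pvHamChk_sound (v : Int) (h0 : 0 ≤ v) (h : pvHamChk v = true) : isHam v := by
  unfold pvHamChk at h
  rw [beq_iff_eq] at h
  obtain ⟨a, ha⟩ := pvStrip_factor 2 v.toNat v.toNat
  obtain ⟨b, hb⟩ := pvStrip_factor 3 v.toNat (pvStrip 2 v.toNat v.toNat)
  obtain ⟨c, hc⟩ := pvStrip_factor 5 v.toNat (pvStrip 3 v.toNat (pvStrip 2 v.toNat v.toNat))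
  have hv : v.toNat = 2^a * 3^b * 5^c := by
    rw [ha, hb, hc, h]
    ring
  refine ⟨a, b, c, ?_⟩
  have : v = (v.toNat : ℤ) := (Int.toNat_of_nonneg h0).symm
  rw [this, hv]
  push_cast
  ring

theorem triple_factors_le (a b c : ℕ) :
    (2:ℤ)^a ≤ 2^a * 3^b * 5^c ∧ (3:ℤ)^b ≤ 2^a * 3^b * 5^c ∧ (5:ℤ)^c ≤ 2^a * 3^b * 5^c := by
  have t2 : (1:ℤ) ≤ 2^a := one_le_pow₀ (by norm_num)
  have t3 : (1:ℤ) ≤ 3^b := one_le_pow₀ (by norm_num)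
  have t5 : (1:ℤ) ≤ 5^c := one_le_pow₀ (by norm_num)
  refine ⟨?_, ?_, ?_⟩
  · have h35 : (1:ℤ) ≤ 3^b * 5^c := by nlinarith
    calc (2:ℤ)^a = 2^a * 1 := (mul_one _).symm
      _ ≤ 2^a * (3^b * 5^c) := mul_le_mul_of_nonneg_left h35 (by positivity)
      _ = 2^a * 3^b * 5^c := by ring
  · calc (3:ℤ)^b = 1 * 3^b * 1 := by ring
      _ ≤ 2^a * 3^b * 1 := by
          have := mul_le_mul_of_nonneg_right t2 (show (0:ℤ) ≤ 3^b by positivity)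
          nlinarith
      _ ≤ 2^a * 3^b * 5^c := mul_le_mul_of_nonneg_left t5 (by positivity)
  · calc (5:ℤ)^c = 1 * 5^c := (one_mul _).symm
      _ ≤ (2^a * 3^b) * 5^c := by
          have h23 : (1:ℤ) ≤ 2^a * 3^b := by nlinarith
          exact mul_le_mul_of_nonneg_right h23 (by positivity)

theorem pvL3_mem : ∀ x : Int, x ∈ pvL3 ↔ isHam x ∧ x < 300 := by
  intro x
  constructor
  · intro hx
    have hall : pvL3.all (fun v => pvHamChk v && decide (0 ≤ v) && decide (v < 300)) = true := by
      decide
    rw [List.all_eq_true] at hall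
    have := hall x hx
    simp only [Bool.and_eq_true, decide_eq_true_eq] at this
    exact ⟨pvHamChk_sound x this.1.2 this.1.1, this.2⟩
  · rintro ⟨⟨a, b, c, rfl⟩, hlt⟩
    obtain ⟨f2, f3, f5⟩ := triple_factors_le a b c
    have ha : a < 9 := by
      by_contra hcon
      have h9 : (2:ℤ)^9 ≤ 2^a := pow_le_pow_right₀ (by norm_num) (by omega)
      norm_num at h9
      linarith
    have hb : b < 6 := by
      by_contra hcon
      have h9 : (3:ℤ)^6 ≤ 3^b := pow_le_pow_right₀ (by norm_num) (by omega)
      norm_num at h9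
      linarith
    have hc : c < 4 := by
      by_contra hcon
      have h9 : (5:ℤ)^4 ≤ 5^c := pow_le_pow_right₀ (by norm_num) (by omega)
      norm_num at h9
      linarith
    have key : ∀ a' ∈ List.range 9, ∀ b' ∈ List.range 6, ∀ c' ∈ List.range 4,
        ((2:ℤ)^a' * 3^b' * 5^c' < 300) → (2:ℤ)^a' * 3^b' * 5^c' ∈ pvL3 := by decide
    exact key a (List.mem_range.mpr ha) b (List.mem_range.mpr hb) c (List.mem_range.mpr hc) hlt

theorem pvL3_nodup : pvL3.Nodup := by decide

-- unfolding of one loop step (for rewriting with explicit fuel terms)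
theorem pvLoopA_succ (n : Int) (f : ℕ) (S : PySem.Set Int) (bound : Int) :
    pvLoopA n (f+1) S bound =
      if PySem.Set.len S < 2 * n then pvLoopA n f (pvPassA S bound) (bound + 100) else S := rfl

theorem loopA_start (n : Int) (h : 56 ≤ 2 * n) (F : ℕ) :
    pvLoopA n (F + 3) (PySem.Set.ofList [1]) 100 = pvLoopA n F pvL3 400 := by
  have e1 : pvPassA (PySem.Set.ofList ([1] : List Int)) 100 = pvL1 := by decide
  have e2 : pvPassA pvL1 200 = pvL2 := by decide
  have e3 : pvPassA pvL2 300 = pvL3 := by decide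
  have l0 : PySem.Set.len (PySem.Set.ofList ([1] : List Int)) = 1 := by decide
  have l1 : PySem.Set.len pvL1 = 13 := by decide
  have l2 : PySem.Set.len pvL2 = 39 := by decide
  rw [show F + 3 = (F + 2) + 1 by omega, pvLoopA_succ, if_pos (by have := l0; omega), e1]
  show pvLoopA n (F + 2) pvL1 200 = pvLoopA n F pvL3 400
  rw [show F + 2 = (F + 1) + 1 by omega, pvLoopA_succ, if_pos (by have := l1; omega), e2]
  show pvLoopA n (F + 1) pvL2 300 = pvLoopA n F pvL3 400
  rw [pvLoopA_succ, if_pos (by have := l2; omega), e3]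
  show pvLoopA n F pvL3 400 = pvLoopA n F pvL3 400
  rfl

-- the saturated outer loop
theorem loopA_run (n : Int) (m : ℕ) (hm : 2 * n ≤ ((m * m : ℕ) : ℤ)) :
    ∀ (f : ℕ) (S : PySem.Set Int) (bound : Int), S.Nodup →
      (∀ x, x ∈ S ↔ isHam x ∧ x < bound - 100) → 300 ≤ bound →
      (6:ℤ)^m ≤ bound - 100 + 100 * (f:ℤ) →
      ∃ B', 200 ≤ B' ∧ (pvLoopA n f S bound).Nodup ∧
        (∀ x, x ∈ pvLoopA n f S bound ↔ isHam x ∧ x < B') ∧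
        2 * n ≤ ((pvLoopA n f S bound).length : ℤ) := by
  intro f
  induction f with
  | zero =>
      intro S bound hnd hmem hb hfuel
      simp only [Nat.cast_zero, mul_zero, add_zero] at hfuel
      simp only [pvLoopA]
      refine ⟨bound - 100, by omega, hnd, hmem, ?_⟩
      have := ham_length_ge S (bound - 100) m hnd hmem hfuel
      have hcast : ((m * m : ℕ) : ℤ) ≤ (S.length : ℤ) := by exact_mod_cast this
      omega
  | succ f ih =>
      intro S bound hnd hmem hb hfuel
      rw [pvLoopA_succ]
      by_cases hcond : PySem.Set.len S < 2 * n
      · rw [if_pos hcond]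
        have hmem' := pass_ham S bound (bound - 100) hmem (by omega) (by ring)
        have hnd' := pvPassA_nodup S bound hnd
        have hmem'' : ∀ x, x ∈ pvPassA S bound ↔ isHam x ∧ x < (bound + 100) - 100 := by
          intro x
          rw [hmem' x]
          constructor <;> (rintro ⟨h1, h2⟩; exact ⟨h1, by omega⟩)
        refine ih (pvPassA S bound) (bound + 100) hnd' hmem'' (by omega) ?_
        push_cast at hfuel ⊢
        omega
      · rw [if_neg hcond]
        refine ⟨bound - 100, by omega, hnd, hmem, ?_⟩
        have hlen : PySem.Set.len S = (S.length : ℤ) := rfl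
        omega

-- ---- B side: exact shapes of the three nested loops ----
def consFun {gam : Type} (z : gam) (s : ℕ → gam) : ℕ → gam
  | 0 => z
  | j+1 => s j

theorem consFun_zero {gam : Type} (z : gam) (s : ℕ → gam) : consFun z s 0 = z := rfl
theorem consFun_succ {gam : Type} (z : gam) (s : ℕ → gam) (j : ℕ) : consFun z s (j+1) = s j := rfl

theorem pvLoop5_eq (limit : Int) :
    ∀ (f : ℕ) (c : Int) (vals : List Int), 1 ≤ c → limit ≤ c + (f:ℤ) →
      ∃ K : ℕ, pvLoop5 limit f c vals = vals ++ (List.range K).map (fun k => c * 5^k) ∧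
        ∀ k : ℕ, (c * 5^k < limit ↔ k < K) := by
  intro f
  induction f with
  | zero =>
      intro c vals hc hf
      simp only [Nat.cast_zero, add_zero] at hf
      refine ⟨0, by simp [pvLoop5], ?_⟩
      intro k
      have : c ≤ c * 5^k := le_mul_of_one_le_right (by omega) (one_le_pow₀ (by norm_num))
      constructor
      · intro hlt; omega
      · omega
  | succ f ih =>
      intro c vals hc hf
      simp only [pvLoop5]
      by_cases hcond : c < limit
      · rw [if_pos hcond]
        obtain ⟨K, heq, hiff⟩ := ih (c * 5) (vals ++ [c]) (by nlinarith)
          (by push_cast at hf ⊢; nlinarith)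
        refine ⟨K + 1, ?_, ?_⟩
        · have hmap : List.map ((fun k => c * 5^k) ∘ Nat.succ) (List.range K) =
              List.map (fun k => c * 5 * 5^k) (List.range K) :=
            List.map_congr_left (fun k _ => by simp only [Function.comp_apply, pow_succ]; ring)
          rw [heq, List.range_succ_eq_map, List.map_cons, List.map_map, hmap]
          simp [List.append_assoc]
        · intro k
          cases k with
          | zero => simpa using hcond
          | succ k =>
              have : c * 5^(k+1) = (c * 5) * 5^k := by rw [pow_succ]; ring
              rw [this, hiff k]
              omega
      · rw [if_neg hcond]
        refine ⟨0, by simp, ?_⟩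
        intro k
        have : c ≤ c * 5^k := le_mul_of_one_le_right (by omega) (one_le_pow₀ (by norm_num))
        constructor
        · intro hlt; omega
        · omega

theorem pvLoop3_eq (limit : Int) :
    ∀ (f : ℕ) (b : Int) (vals : List Int), 1 ≤ b → limit ≤ b + (f:ℤ) →
      ∃ (KB : ℕ) (KC : ℕ → ℕ),
        pvLoop3 limit f b vals = vals ++ (List.range KB).flatMap
          (fun j => (List.range (KC j)).map (fun k => b * 3^j * 5^k)) ∧
        (∀ j : ℕ, (b * 3^j < limit ↔ j < KB)) ∧
        (∀ j k : ℕ, (b * 3^j * 5^k < limit ↔ k < KC j)) := by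
  intro f
  induction f with
  | zero =>
      intro b vals hb hf
      simp only [Nat.cast_zero, add_zero] at hf
      refine ⟨0, fun _ => 0, by simp [pvLoop3], ?_, ?_⟩
      · intro j
        have hle : b ≤ b * 3^j := le_mul_of_one_le_right (by omega) (one_le_pow₀ (by norm_num))
        exact ⟨fun hlt => absurd hlt (by omega), fun hk => absurd hk (Nat.not_lt_zero j)⟩
      · intro j k
        have h1 : (1:ℤ) ≤ 3^j * 5^k := one_le_pp 3 5 j k (by norm_num) (by norm_num)
        have hle : b ≤ b * 3^j * 5^k := by
          rw [mul_assoc]; exact le_mul_of_one_le_right (by omega) h1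
        exact ⟨fun hlt => absurd hlt (by omega), fun hk => absurd hk (Nat.not_lt_zero k)⟩
  | succ f ih =>
      intro b vals hb hf
      simp only [pvLoop3]
      by_cases hcond : b < limit
      · rw [if_pos hcond]
        obtain ⟨K0, heq0, hiff0⟩ := pvLoop5_eq limit (limit.toNat + 1) b vals hb
          (by have := Int.self_le_toNat limit; push_cast; omega)
        obtain ⟨KB, KC, heq, hiffB, hiffC⟩ := ih (b * 3) (pvLoop5 limit (limit.toNat + 1) b vals)
          (by nlinarith) (by push_cast at hf ⊢; nlinarith)
        refine ⟨KB + 1, consFun K0 KC, ?_, ?_, ?_⟩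
        · rw [heq, heq0, List.range_succ_eq_map, List.flatMap_cons, List.flatMap_map,
            List.append_assoc]
          simp only [consFun_zero, consFun_succ, pow_zero, mul_one]
          refine congrArg _ (congrArg _ ?_)
          exact (flatMap_congr' _ _ _ (fun j _ =>
            List.map_congr_left (fun k _ => by rw [pow_succ]; ring))).symm
        · intro j
          cases j with
          | zero => simpa using hcond
          | succ j =>
              have h3 : b * 3^(j+1) = (b * 3) * 3^j := by rw [pow_succ]; ring
              rw [h3, hiffB j]
              omega
        · intro j k
          cases j with
          | zero => rw [consFun_zero]; simpa using hiff0 k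
          | succ j =>
              have h3 : b * 3^(j+1) * 5^k = (b * 3) * 3^j * 5^k := by rw [pow_succ]; ring
              rw [consFun_succ, h3]
              exact hiffC j k
      · rw [if_neg hcond]
        refine ⟨0, fun _ => 0, by simp, ?_, ?_⟩
        · intro j
          have hle : b ≤ b * 3^j := le_mul_of_one_le_right (by omega) (one_le_pow₀ (by norm_num))
          exact ⟨fun hlt => absurd hlt (by omega), fun hk => absurd hk (Nat.not_lt_zero j)⟩
        · intro j k
          have h1 : (1:ℤ) ≤ 3^j * 5^k := one_le_pp 3 5 j k (by norm_num) (by norm_num)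
          have hle : b ≤ b * 3^j * 5^k := by
            rw [mul_assoc]; exact le_mul_of_one_le_right (by omega) h1
          exact ⟨fun hlt => absurd hlt (by omega), fun hk => absurd hk (Nat.not_lt_zero k)⟩

theorem pvLoop2_eq (limit : Int) :
    ∀ (f : ℕ) (a : Int) (vals : List Int), 1 ≤ a → limit ≤ a + (f:ℤ) →
      ∃ (KA : ℕ) (KB : ℕ → ℕ) (KC : ℕ → ℕ → ℕ),
        pvLoop2 limit f a vals = vals ++ (List.range KA).flatMap
          (fun i => (List.range (KB i)).flatMap
            (fun j => (List.range (KC i j)).map (fun k => a * 2^i * 3^j * 5^k))) ∧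
        (∀ i : ℕ, (a * 2^i < limit ↔ i < KA)) ∧
        (∀ i j : ℕ, (a * 2^i * 3^j < limit ↔ j < KB i)) ∧
        (∀ i j k : ℕ, (a * 2^i * 3^j * 5^k < limit ↔ k < KC i j)) := by
  intro f
  induction f with
  | zero =>
      intro a vals ha hf
      simp only [Nat.cast_zero, add_zero] at hf
      refine ⟨0, fun _ => 0, fun _ _ => 0, by simp [pvLoop2], ?_, ?_, ?_⟩
      · intro i
        have hle : a ≤ a * 2^i := le_mul_of_one_le_right (by omega) (one_le_pow₀ (by norm_num))
        exact ⟨fun hlt => absurd hlt (by omega), fun hk => absurd hk (Nat.not_lt_zero i)⟩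
      · intro i j
        have h1 : (1:ℤ) ≤ 2^i * 3^j := one_le_pp 2 3 i j (by norm_num) (by norm_num)
        have hle : a ≤ a * 2^i * 3^j := by
          rw [mul_assoc]; exact le_mul_of_one_le_right (by omega) h1
        exact ⟨fun hlt => absurd hlt (by omega), fun hk => absurd hk (Nat.not_lt_zero j)⟩
      · intro i j k
        have h1 : (1:ℤ) ≤ 2^i * (3^j * 5^k) := by
          have h2 : (1:ℤ) ≤ 2^i := one_le_pow₀ (by norm_num)
          have h3 : (1:ℤ) ≤ 3^j * 5^k := one_le_pp 3 5 j k (by norm_num) (by norm_num)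
          nlinarith
        have hle : a ≤ a * 2^i * 3^j * 5^k := by
          rw [mul_assoc, mul_assoc, ← mul_assoc ((2:ℤ)^i)]
          exact le_mul_of_one_le_right (by omega) (by rw [mul_assoc]; exact h1)
        exact ⟨fun hlt => absurd hlt (by omega), fun hk => absurd hk (Nat.not_lt_zero k)⟩
  | succ f ih =>
      intro a vals ha hf
      simp only [pvLoop2]
      by_cases hcond : a < limit
      · rw [if_pos hcond]
        obtain ⟨KB0, KC0, heq0, hiffB0, hiffC0⟩ := pvLoop3_eq limit (limit.toNat + 1) a vals ha
          (by have := Int.self_le_toNat limit; push_cast; omega)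
        obtain ⟨KA, KB, KC, heq, hiffA, hiffB, hiffC⟩ :=
          ih (a * 2) (pvLoop3 limit (limit.toNat + 1) a vals) (by nlinarith)
            (by push_cast at hf ⊢; nlinarith)
        refine ⟨KA + 1, consFun KB0 KB, consFun KC0 KC, ?_, ?_, ?_, ?_⟩
        · rw [heq, heq0, List.range_succ_eq_map, List.flatMap_cons, List.flatMap_map,
            List.append_assoc]
          simp only [consFun_zero, consFun_succ, pow_zero, mul_one]
          refine congrArg _ (congrArg _ ?_)
          exact (flatMap_congr' _ _ _ (fun i _ => flatMap_congr' _ _ _ (fun j _ =>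
            List.map_congr_left (fun k _ => by rw [pow_succ]; ring)))).symm
        · intro i
          cases i with
          | zero => simpa using hcond
          | succ i =>
              have h2 : a * 2^(i+1) = (a * 2) * 2^i := by rw [pow_succ]; ring
              rw [h2, hiffA i]
              omega
        · intro i j
          cases i with
          | zero => rw [consFun_zero]; simpa using hiffB0 j
          | succ i =>
              have h2 : a * 2^(i+1) * 3^j = (a * 2) * 2^i * 3^j := by rw [pow_succ]; ring
              rw [consFun_succ, h2]
              exact hiffB i j
        · intro i j k
          cases i with
          | zero => rw [consFun_zero]; simpa using hiffC0 j k
          | succ i =>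
              have h2 : a * 2^(i+1) * 3^j * 5^k = (a * 2) * 2^i * 3^j * 5^k := by
                rw [pow_succ]; ring
              rw [consFun_succ, h2]
              exact hiffC i j k
      · rw [if_neg hcond]
        refine ⟨0, fun _ => 0, fun _ _ => 0, by simp, ?_, ?_, ?_⟩
        · intro i
          have hle : a ≤ a * 2^i := le_mul_of_one_le_right (by omega) (one_le_pow₀ (by norm_num))
          exact ⟨fun hlt => absurd hlt (by omega), fun hk => absurd hk (Nat.not_lt_zero i)⟩
        · intro i j
          have h1 : (1:ℤ) ≤ 2^i * 3^j := one_le_pp 2 3 i j (by norm_num) (by norm_num)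
          have hle : a ≤ a * 2^i * 3^j := by
            rw [mul_assoc]; exact le_mul_of_one_le_right (by omega) h1
          exact ⟨fun hlt => absurd hlt (by omega), fun hk => absurd hk (Nat.not_lt_zero j)⟩
        · intro i j k
          have h1 : (1:ℤ) ≤ 2^i * (3^j * 5^k) := by
            have h2 : (1:ℤ) ≤ 2^i := one_le_pow₀ (by norm_num)
            have h3 : (1:ℤ) ≤ 3^j * 5^k := one_le_pp 3 5 j k (by norm_num) (by norm_num)
            nlinarith
          have hle : a ≤ a * 2^i * 3^j * 5^k := by
            rw [mul_assoc, mul_assoc, ← mul_assoc ((2:ℤ)^i)]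
            exact le_mul_of_one_le_right (by omega) (by rw [mul_assoc]; exact h1)
          exact ⟨fun hlt => absurd hlt (by omega), fun hk => absurd hk (Nat.not_lt_zero k)⟩

theorem nodup_flatMap' {α β : Type} (l : List α) (g : α → List β)
    (h1 : ∀ x ∈ l, (g x).Nodup)
    (h2 : l.Pairwise (fun x y => ∀ b ∈ g x, b ∉ g y)) : (l.flatMap g).Nodup := by
  induction l with
  | nil => simp
  | cons a t ih =>
      rw [List.pairwise_cons] at h2
      simp only [List.flatMap_cons]
      rw [List.nodup_append]
      refine ⟨h1 a List.mem_cons_self, ih (fun x hx => h1 x (List.mem_cons_of_mem _ hx)) h2.2, ?_⟩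
      intro b hb c hc
      rw [List.mem_flatMap] at hc
      obtain ⟨x, hx, hcx⟩ := hc
      intro heq
      exact h2.1 x hx b hb (heq ▸ hcx)

-- the full candidate list for one limit: exactly the Hamming numbers below limit, no duplicates
theorem pvVals_spec (limit : Int) (_hl : 1 ≤ limit) :
    (∀ x, x ∈ pvLoop2 limit (limit.toNat + 1) 1 [] ↔ isHam x ∧ x < limit) ∧
      (pvLoop2 limit (limit.toNat + 1) 1 []).Nodup := by
  obtain ⟨KA, KB, KC, heq, hiffA, hiffB, hiffC⟩ :=
    pvLoop2_eq limit (limit.toNat + 1) 1 [] le_rfl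
      (by have := Int.self_le_toNat limit; push_cast; omega)
  rw [heq]
  simp only [List.nil_append, one_mul]
  constructor
  · intro x
    simp only [List.mem_flatMap, List.mem_map, List.mem_range]
    constructor
    · rintro ⟨i, hi, j, hj, k, hk, rfl⟩
      have hlt := (hiffC i j k).mpr hk
      simp only [one_mul] at hlt
      exact ⟨⟨i, j, k, rfl⟩, hlt⟩
    · rintro ⟨⟨a, b, c, rfl⟩, hlt⟩
      have h3p : (1:ℤ) ≤ 3^b * 5^c := one_le_pp 3 5 b c (by norm_num) (by norm_num)
      have h5p : (1:ℤ) ≤ 5^c := one_le_pow₀ (by norm_num)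
      have hA : 2^a < limit := by
        have : (2:ℤ)^a ≤ 2^a * 3^b * 5^c := by
          rw [mul_assoc]; exact le_mul_of_one_le_right (by positivity) h3p
        omega
      have hB : 2^a * 3^b < limit := by
        have : (2:ℤ)^a * 3^b ≤ 2^a * 3^b * 5^c := le_mul_of_one_le_right (by positivity) h5p
        omega
      refine ⟨a, ?_, b, ?_, c, ?_, rfl⟩
      · have := (hiffA a).mp (by simpa using hA)
        exact this
      · have := (hiffB a b).mp (by simpa using hB)
        exact this
      · have := (hiffC a b c).mp (by simpa using hlt)
        exact this
  · refine nodup_flatMap' _ _ ?_ ?_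
    · intro i _
      refine nodup_flatMap' _ _ ?_ ?_
      · intro j _
        refine List.Nodup.map_on ?_ List.nodup_range
        intro k _ k' _ hfe
        exact (triple_inj_int i j k i j k' hfe).2.2
      · refine List.Pairwise.imp ?_ List.pairwise_lt_range
        intro j j' hjj x hx hx'
        simp only [List.mem_map, List.mem_range] at hx hx'
        obtain ⟨k, _, hk⟩ := hx
        obtain ⟨k', _, hk'⟩ := hx'
        have := (triple_inj_int i j k i j' k' (by rw [hk, hk'])).2.1
        omega
    · refine List.Pairwise.imp ?_ List.pairwise_lt_range
      intro i i' hii x hx hx'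
      simp only [List.mem_flatMap, List.mem_map, List.mem_range] at hx hx'
      obtain ⟨j, _, k, _, hk⟩ := hx
      obtain ⟨j', _, k', _, hk'⟩ := hx'
      have := (triple_inj_int i j k i' j' k' (by rw [hk, hk'])).1
      omega

-- unfolding of one step of B's outer loop
theorem pvLoopB_succ (n : Int) (f : ℕ) (limit : Int) :
    pvLoopB n (f+1) limit =
      if n ≤ ((pvLoop2 limit (limit.toNat + 1) 1 []).length : ℤ) then
        PySem.List.slice
          (PySem.List.sorted (pvLoop2 limit (limit.toNat + 1) 1 []) (fun x => x) false)
          none (some n)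
      else pvLoopB n f (limit * 2) := rfl

theorem loopB_run (n : Int) (m : ℕ) (hm : n ≤ ((m * m : ℕ) : ℤ)) :
    ∀ (f : ℕ) (limit : Int), 1 ≤ limit → (6:ℤ)^m ≤ limit * 2^f →
      ∃ vals B', (∀ x, x ∈ vals ↔ isHam x ∧ x < B') ∧ vals.Nodup ∧
        n ≤ (vals.length : ℤ) ∧
        pvLoopB n (f+1) limit =
          PySem.List.slice (PySem.List.sorted vals (fun x => x) false) none (some n) := by
  intro f
  induction f with
  | zero =>
      intro limit hl hfuel
      simp only [pow_zero, mul_one] at hfuel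
      obtain ⟨hmem, hnd⟩ := pvVals_spec limit hl
      have hlen := ham_length_ge _ limit m hnd hmem hfuel
      have hcast : ((m * m : ℕ) : ℤ) ≤ ((pvLoop2 limit (limit.toNat + 1) 1 []).length : ℤ) := by
        exact_mod_cast hlen
      rw [pvLoopB_succ, if_pos (by omega)]
      exact ⟨_, limit, hmem, hnd, by omega, rfl⟩
  | succ f ih =>
      intro limit hl hfuel
      rw [pvLoopB_succ]
      by_cases hcond : n ≤ ((pvLoop2 limit (limit.toNat + 1) 1 []).length : ℤ)
      · rw [if_pos hcond]
        obtain ⟨hmem, hnd⟩ := pvVals_spec limit hl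
        exact ⟨_, limit, hmem, hnd, hcond, rfl⟩
      · rw [if_neg hcond]
        refine ih (limit * 2) (by omega) ?_
        have : limit * 2 * 2^f = limit * 2^(f+1) := by rw [pow_succ]; ring
        rw [this]
        exact hfuel

-- ---- sorted prefixes of two Hamming sets agree ----
theorem sorted_strict (xs : List Int) (h : xs.Nodup) :
    (PySem.List.sorted xs (fun x => x) false).Pairwise (· < ·) := by
  have hperm := PySem.List.sorted_perm xs (fun x => x) false
  have hnd : (PySem.List.sorted xs (fun x => x) false).Nodup := hperm.nodup_iff.mpr h
  have hle := PySem.List.sorted_pairwise xs (fun x => x)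
  exact (hle.and hnd).imp (fun hab => lt_of_le_of_ne hab.1 hab.2)

theorem filter_lt_prefix (X : Int) :
    ∀ (L : List Int), L.Pairwise (· < ·) →
      ∃ r, L = L.filter (fun v => decide (v < X)) ++ r := by
  intro L
  induction L with
  | nil => exact fun _ => ⟨[], rfl⟩
  | cons a t ih =>
      intro hp
      rw [List.pairwise_cons] at hp
      by_cases ha : a < X
      · obtain ⟨r, hr⟩ := ih hp.2
        refine ⟨r, ?_⟩
        rw [List.filter_cons_of_pos (by simpa using ha), List.cons_append, ← hr]
      · refine ⟨a :: t, ?_⟩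
        rw [List.filter_cons_of_neg (by simpa using ha)]
        have : t.filter (fun v => decide (v < X)) = [] := by
          rw [List.filter_eq_nil_iff]
          intro v hv
          simp only [decide_eq_true_eq]
          intro hvX
          exact ha (lt_trans (hp.1 v hv) hvX)
        rw [this, List.nil_append]

theorem take_sorted_le (xs ys : List Int) (X Y : Int) (hXY : X ≤ Y)
    (hxn : xs.Nodup) (hyn : ys.Nodup)
    (hx : ∀ v, v ∈ xs ↔ isHam v ∧ v < X) (hy : ∀ v, v ∈ ys ↔ isHam v ∧ v < Y)
    (k : ℕ) (hkx : k ≤ xs.length) :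
    (PySem.List.sorted xs (fun x => x) false).take k =
      (PySem.List.sorted ys (fun x => x) false).take k := by
  set L := PySem.List.sorted ys (fun x => x) false with hL
  have hLperm : L.Perm ys := PySem.List.sorted_perm ys (fun x => x) false
  have hLnd : L.Nodup := hLperm.nodup_iff.mpr hyn
  have hLlt : L.Pairwise (· < ·) := sorted_strict ys hyn
  set F := L.filter (fun v => decide (v < X)) with hF
  have hFlt : F.Pairwise (· < ·) := hLlt.filter _
  have hFnd : F.Nodup := List.Nodup.filter _ hLnd
  have hFmem : ∀ v, v ∈ F ↔ v ∈ xs := by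
    intro v
    rw [hF, List.mem_filter]
    simp only [decide_eq_true_eq]
    rw [hx]
    constructor
    · rintro ⟨hvL, hvX⟩
      exact ⟨((hy v).mp (hLperm.mem_iff.mp hvL)).1, hvX⟩
    · rintro ⟨hham, hvX⟩
      exact ⟨hLperm.mem_iff.mpr ((hy v).mpr ⟨hham, by omega⟩), hvX⟩
  have hFperm : F.Perm xs :=
    (List.perm_ext_iff_of_nodup hFnd hxn).mpr hFmem
  have hsx : PySem.List.sorted xs (fun x => x) false = F :=
    PySem.List.sorted_eq_of_perm_of_pairwise_lt xs F (fun x => x) hFperm hFlt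
  obtain ⟨r, hr⟩ := filter_lt_prefix X L hLlt
  have hkF : k ≤ F.length := by
    rw [hFperm.length_eq]
    exact hkx
  rw [hsx, hr, List.take_append_of_le_length hkF]

-- the computable square root over-approximates: t < (pvSqrt t + 1)^2
theorem pvSqrtGo_spec : ∀ (f t : ℕ), t ≤ f → t < (pvSqrtGo f t + 1) * (pvSqrtGo f t + 1) := by
  intro f
  induction f with
  | zero =>
      intro t ht
      interval_cases t
      decide
  | succ f ih =>
      intro t ht
      simp only [pvSqrtGo]
      by_cases h2 : t < 2
      · rw [if_pos h2]
        interval_cases t <;> decide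
      · rw [if_neg h2]
        have ht4 : t / 4 ≤ f := by omega
        have IH := ih (t / 4) ht4
        set s := pvSqrtGo f (t / 4) with hs
        have h1 : t < (s+1) * (s+1) * 4 := by
          have := (Nat.div_lt_iff_lt_mul (by norm_num : 0 < 4)).mp IH
          omega
        by_cases hbr : (2 * s + 1) * (2 * s + 1) ≤ t
        · rw [if_pos hbr]
          nlinarith
        · rw [if_neg hbr]
          exact Nat.lt_of_not_le hbr

theorem sqrt_bound (t : ℕ) : t ≤ (pvSqrt t + 1) * (pvSqrt t + 1) :=
  le_of_lt (pvSqrtGo_spec t t le_rfl)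

-- ---- main equality for n ≥ 28 ----
theorem main_ge28 (n : Int) (h28 : 28 ≤ n) :
    find_regular_numbers n = find_regular_numbers_alt n := by
  -- A side
  have hA : find_regular_numbers n =
      PySem.List.slice
        (PySem.List.sorted (pvLoopA n (6 ^ (pvSqrt (2*n).toNat + 1) + 3)
          (PySem.Set.ofList [1]) 100) (fun x => x) false) none (some n) := rfl
  set mA := pvSqrt (2*n).toNat + 1 with hmA
  have hmAbound : 2 * n ≤ ((mA * mA : ℕ) : ℤ) := by
    have h1 : ((2*n).toNat : ℤ) = 2*n := Int.toNat_of_nonneg (by omega)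
    have h2 : (2*n).toNat ≤ mA * mA := sqrt_bound (2*n).toNat
    have h3 : (((2*n).toNat : ℕ) : ℤ) ≤ ((mA * mA : ℕ) : ℤ) := by exact_mod_cast h2
    omega
  have hstart := loopA_start n (by omega) (6 ^ mA)
  obtain ⟨BA, hBA200, hAnd, hAmem, hAlen⟩ := loopA_run n mA hmAbound (6 ^ mA) pvL3 400
    pvL3_nodup (by intro x; rw [pvL3_mem x]; norm_num) (by norm_num)
    (by
      have h1 : (1:ℤ) ≤ 6 ^ mA := one_le_pow₀ (by norm_num)
      have h2 : ((6 ^ mA : ℕ) : ℤ) = (6:ℤ) ^ mA := by push_cast; ring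
      rw [h2]
      omega)
  set R := pvLoopA n (6 ^ mA) pvL3 400 with hR
  -- B side
  have hBdef : find_regular_numbers_alt n = pvLoopB n (3 * (pvSqrt n.toNat + 1) + 1) 2 := by
    unfold find_regular_numbers_alt pvFuelB
    rw [if_neg (by omega)]
  set mB := pvSqrt n.toNat + 1 with hmB
  have hmBbound : n ≤ ((mB * mB : ℕ) : ℤ) := by
    have h1 : (n.toNat : ℤ) = n := Int.toNat_of_nonneg (by omega)
    have h2 : n.toNat ≤ mB * mB := sqrt_bound n.toNat
    have h3 : ((n.toNat : ℕ) : ℤ) ≤ ((mB * mB : ℕ) : ℤ) := by exact_mod_cast h2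
    omega
  obtain ⟨vals, BB, hBmem, hBnd, hBlen, hBeq⟩ := loopB_run n mB hmBbound (3 * mB) 2 (by norm_num)
    (by
      have h68 : (6:ℤ)^mB ≤ 8^mB := pow_le_pow_left₀ (by norm_num) (by norm_num) mB
      have h8 : (8:ℤ)^mB = 2^(3*mB) := by
        rw [pow_mul]
        norm_num
      have h2pos : (0:ℤ) < 2^(3*mB) := by positivity
      omega)
  rw [hA, hstart, hBdef, hBeq]
  -- both slices are takes
  rw [PySem.List.slice_to _ (by omega : (0:ℤ) ≤ n), PySem.List.slice_to _ (by omega : (0:ℤ) ≤ n)]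
  rcases le_total BA BB with hord | hord
  · exact take_sorted_le R vals BA BB hord hAnd hBnd hAmem hBmem n.toNat (by omega)
  · exact (take_sorted_le vals R BB BA hord hBnd hAnd hBmem hAmem n.toNat (by omega)).symm

-- ---- n ≤ 0: A's loop is never entered, [1][:n] is empty ----
theorem small_nonpos (n : Int) (h : n ≤ 0) : find_regular_numbers n = [] := by
  unfold find_regular_numbers pvFuelA
  have hstop : pvLoopA n (6 ^ (pvSqrt (2 * n).toNat + 1) + 3) (PySem.Set.ofList [1]) 100 =
      PySem.Set.ofList [1] := by
    rw [show 6 ^ (pvSqrt (2 * n).toNat + 1) + 3 = (6 ^ (pvSqrt (2 * n).toNat + 1) + 2) + 1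
      by omega, pvLoopA_succ, if_neg]
    have hl : PySem.Set.len (PySem.Set.ofList ([1] : List Int)) = 1 := by decide
    have := hl
    omega
  rw [hstop]
  have hs : PySem.List.sorted (PySem.Set.ofList ([1] : List Int)) (fun x => x) false = [1] := by
    decide
  rw [hs]
  rcases eq_or_lt_of_le h with rfl | hlt
  · rw [PySem.List.slice_to _ le_rfl]
    simp
  · have hk : n = -(((-n).toNat : ℕ) : ℤ) := by omega
    have hk1 : 1 ≤ (-n).toNat := by omega
    rw [hk, PySem.List.slice_to_neg_natCast _ _ (by omega)]
    simp [Nat.sub_eq_zero_of_le hk1]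

-- ===== VERDICT (by name: the statement is the Claim_ definition above) =====
set_option maxHeartbeats 8000000 in
theorem find_regular_numbers_spec : Claim_unchanged_find_regular_numbers := by
  unfold Claim_unchanged_find_regular_numbers
  intro n _
  unfold Spec_find_regular_numbers
  intro hnd
  rcases lt_or_ge n 1 with hn0 | hn1
  · rw [small_nonpos n (by omega)]
    unfold find_regular_numbers_alt
    rw [if_pos (by omega)]
  · rcases lt_or_ge n 28 with hn27 | hn28
    · interval_cases n
      all_goals first
        | exact absurd (by decide) hnd
        | decide
    · exact main_ge28 n hn28

theorem find_regular_numbers_changed : Claim_changed_find_regular_numbers := by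
  unfold Claim_changed_find_regular_numbers; decide

theorem find_regular_numbers_tight : Claim_exact_find_regular_numbers := by
  unfold Claim_exact_find_regular_numbers
  intro n _ hD
  rcases hD with rfl | rfl | rfl <;> decide
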